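-- pv_equiv track=rewrite | github.com/qutech/qupulse | qupulse/hardware/util.py | not_none_indices
-- ===== SOURCE A (Python) =====
-- from typing import Collection, Sequence, Tuple, Union, Optional
--
-- def not_none_indices(seq: Sequence) -> Tuple[Sequence[Optional[int]], int]:
--     """Calculate lookup table from sparse to non sparse indices and the total number of not None elements
--
--     assert ([None, 0, 1, None, None, 2], 3) == not_none_indices([None, 'a', 'b', None, None, 'c'])
--     """
--     indices = []
--     idx = 0
--     for elem in seq:
--         if elem is None:
--             indices.append(elem)
--         else:
--             indices.append(idx)
--             idx += 1
--     return indices, idx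
-- ===== SOURCE B (Python) =====
-- from itertools import accumulate
--
-- def not_none_indices(seq):
--     mask = [e is not None for e in seq]
--     prefix = list(accumulate(map(int, mask)))
--     indices = [p - 1 if m else None for m, p in zip(mask, prefix)]
--     return indices, (prefix[-1] if prefix else 0)
-- ===== Notes on version B (the rewrite author's own statement) =====
-- stated objective: alternative
-- what changed: Replaced the fused running-counter loop with a mask / prefix-sum (itertools.accumulate) / map decomposition; the count is the last prefix value.
import Mathlib
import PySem

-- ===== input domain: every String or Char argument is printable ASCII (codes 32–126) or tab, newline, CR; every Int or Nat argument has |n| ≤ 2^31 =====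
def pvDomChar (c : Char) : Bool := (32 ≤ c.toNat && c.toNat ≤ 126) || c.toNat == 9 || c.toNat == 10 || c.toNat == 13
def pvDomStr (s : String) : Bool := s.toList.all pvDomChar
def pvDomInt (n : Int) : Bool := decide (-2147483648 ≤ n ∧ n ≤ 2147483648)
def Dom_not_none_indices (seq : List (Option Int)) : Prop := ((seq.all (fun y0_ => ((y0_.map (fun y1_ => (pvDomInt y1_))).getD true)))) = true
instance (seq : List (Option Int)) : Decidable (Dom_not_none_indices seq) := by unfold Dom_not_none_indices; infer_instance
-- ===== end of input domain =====

-- B re-implements A as a mask / prefix-sum / map decomposition (alternative structure, same O(n) cost).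

-- ===== PORT A =====
-- A: single loop appending to `indices` while incrementing a running counter `idx`.
def not_none_indices (seq : List (Option Int)) : List (Option Int) × Int :=
  seq.foldl
    (fun st elem =>
      match elem with
      | none => (st.1 ++ [none], st.2)
      | some _ => (st.1 ++ [some st.2], st.2 + 1))
    ([], 0)

-- ===== PORT B =====
-- `itertools.accumulate(mask)`: running sums of the 0/1 mask.
def pvAccum (c : Int) : List Bool → List Int
  | [] => []
  | b :: bs =>
      let c' := c + (if b then 1 else 0)
      c' :: pvAccum c' bs

def not_none_indices_alt (seq : List (Option Int)) : List (Option Int) × Int :=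
  let mask := seq.map (fun e => e.isSome)
  let pref := pvAccum 0 mask
  let indices := (mask.zip pref).map (fun mp => if mp.1 then some (mp.2 - 1) else none)
  (indices, pref.getLast?.getD 0)

-- ===== PRECONDITION & SPEC =====
def Spec_not_none_indices (seq : List (Option Int)) (out : List (Option Int) × Int) : Prop := out = not_none_indices_alt seq
instance (seq : List (Option Int)) (out : List (Option Int) × Int) : Decidable (Spec_not_none_indices seq out) := by unfold Spec_not_none_indices; infer_instance

-- ===== CLAIM (what is proved, stated in full; the proofs are below) =====
def Claim_equal_not_none_indices : Prop := ∀ (seq : List (Option Int)), Dom_not_none_indices seq → Spec_not_none_indices seq (not_none_indices seq)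

-- ===== LEMMAS AND PROOFS =====

-- common reference semantics: output list starting the counter at c, and the count of non-None elements
def pvW (c : Int) : List (Option Int) → List (Option Int)
  | [] => []
  | none :: t => none :: pvW c t
  | some _ :: t => some c :: pvW (c + 1) t

def pvCnt : List (Option Int) → Int
  | [] => 0
  | none :: t => pvCnt t
  | some _ :: t => pvCnt t + 1

theorem foldA_eq (seq : List (Option Int)) : ∀ (ind : List (Option Int)) (c : Int),
    seq.foldl
      (fun st elem =>
        match elem with
        | none => (st.1 ++ [none], st.2)
        | some _ => (st.1 ++ [some st.2], st.2 + 1))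
      (ind, c) = (ind ++ pvW c seq, c + pvCnt seq) := by
  induction seq with
  | nil => intro ind c; simp [pvW, pvCnt]
  | cons h t ih =>
      intro ind c
      cases h with
      | none => simp [List.foldl, ih, pvW, pvCnt]
      | some x => simp [List.foldl, ih, pvW, pvCnt]; omega

theorem zipAccum_eq (seq : List (Option Int)) : ∀ (c : Int),
    ((seq.map (fun e => e.isSome)).zip (pvAccum c (seq.map (fun e => e.isSome)))).map
      (fun mp => if mp.1 then some (mp.2 - 1) else none) = pvW c seq := by
  induction seq with
  | nil => intro c; simp [pvAccum, pvW]
  | cons h t ih =>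
      intro c
      cases h with
      | none => simp [pvAccum, pvW, ih]
      | some x => simp [pvAccum, pvW, ih]

theorem accum_last (bs : List Bool) : ∀ (c : Int), bs ≠ [] →
    (pvAccum c bs).getLast? = some (c + pvCnt (bs.map (fun b => if b then some (0:Int) else none))) := by
  induction bs with
  | nil => intro c h; simp at h
  | cons b t ih =>
      intro c _
      by_cases ht : t = []
      · subst ht; cases b <;> simp [pvAccum, pvCnt]
      · have h := ih (c + (if b then 1 else 0)) ht
        cases hb : pvAccum (c + (if b then 1 else 0)) t with
        | nil =>
            exfalso
            cases t with
            | nil => exact ht rfl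
            | cons y ys => simp [pvAccum] at hb
        | cons y ys =>
            rw [hb] at h
            simp [pvAccum, hb, List.getLast?_cons_cons, h]
            cases b <;> simp [pvCnt] <;> try omega

theorem mask_cnt (seq : List (Option Int)) :
    pvCnt ((seq.map (fun e => e.isSome)).map (fun b => if b then some (0:Int) else none)) = pvCnt seq := by
  induction seq with
  | nil => rfl
  | cons h t ih => cases h <;> simpa [pvCnt, List.map_map] using ih

-- ===== VERDICT (by name: the statement is the Claim_ definition above) =====
theorem not_none_indices_spec : Claim_equal_not_none_indices := by
  intro seq _
  unfold Spec_not_none_indices not_none_indices not_none_indices_alt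
  dsimp only
  rw [foldA_eq seq [] 0, zipAccum_eq seq 0]
  cases hs : seq with
  | nil => simp [pvW, pvCnt, pvAccum]
  | cons a t =>
      have h := accum_last ((a :: t).map (fun e => e.isSome)) 0 (by simp)
      rw [mask_cnt] at h
      simp only [List.map_cons] at h
      simp [h]
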